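-- pv_equiv track=rewrite | github.com/watchdoge256/Nutrition | nutrition/macros.py | _organize_by_days
-- ===== SOURCE A (Python) =====
-- from typing import Dict, List, Tuple
--
-- def _organize_by_days(menu: Dict) -> List[List[Dict]]:
--     """Organize menu dishes by days (simplified - assumes all course types have same number of days)."""
--     if not menu or 'nutrition_totals' in menu:
--         # Remove nutrition_totals if present to avoid processing it
--         menu = {k: v for k, v in menu.items() if k != 'nutrition_totals'}
--
--     if not menu:
--         return []
--
--     # Get the maximum number of dishes in any course type to determine days
--     max_dishes = max(len(dishes) for dishes in menu.values()) if menu else 0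
--
--     days_data = []
--     for day in range(max_dishes):
--         day_dishes = []
--         for course_type, dishes in menu.items():
--             dish_names = list(dishes.keys())
--             if day < len(dish_names):
--                 dish_name = dish_names[day]
--                 day_dishes.append(dishes[dish_name])
--         days_data.append(day_dishes)
--
--     return days_data
-- ===== SOURCE B (Python) =====
-- def _organize_by_days(menu):
--     """Distribute each course's dishes into per-day buckets in one pass."""
--     if not menu or 'nutrition_totals' in menu:
--         menu = {k: v for k, v in menu.items() if k != 'nutrition_totals'}
--     days = []
--     for dishes in menu.values():
--         for i, dish in enumerate(dishes.values()):
--             if i == len(days):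
--                 days.append([])
--             days[i].append(dish)
--     return days
-- ===== Notes on version B (the rewrite author's own statement) =====
-- stated objective: alternative
-- what changed: Inverted the traversal: instead of A's day-major gather (max() over course sizes, then per day rebuild each course's keys() list, bound-check the index and look the dish up by name), B makes one course-major pass scattering each course's values into growing per-day buckets, so no max(), no key list, no index guard and no dict lookup exist. Pre_ excludes association lists with duplicate dish names inside a course, which no Python dict can represent.
import Mathlib
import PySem

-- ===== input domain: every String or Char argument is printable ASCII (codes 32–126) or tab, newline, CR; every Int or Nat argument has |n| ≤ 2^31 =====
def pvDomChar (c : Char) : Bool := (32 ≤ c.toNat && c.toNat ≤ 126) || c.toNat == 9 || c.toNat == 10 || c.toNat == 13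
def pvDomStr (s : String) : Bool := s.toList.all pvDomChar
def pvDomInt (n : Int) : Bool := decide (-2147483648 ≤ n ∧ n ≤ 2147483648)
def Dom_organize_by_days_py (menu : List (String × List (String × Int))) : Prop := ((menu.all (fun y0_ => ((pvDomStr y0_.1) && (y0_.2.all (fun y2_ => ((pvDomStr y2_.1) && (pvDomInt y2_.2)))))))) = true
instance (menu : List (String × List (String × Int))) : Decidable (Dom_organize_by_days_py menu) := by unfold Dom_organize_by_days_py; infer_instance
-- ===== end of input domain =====

-- B inverts the traversal: one course-major pass scattering each course's values into growing
-- per-day buckets, instead of A's day-major gather with max(), keys() lists and dict lookups.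

-- ===== PORT A =====
def organize_by_days_py (menu : List (String × List (String × Int))) : List (List Int) :=
  -- if not menu or 'nutrition_totals' in menu: menu = {k: v ... if k != 'nutrition_totals'}
  let menu1 := if menu.isEmpty || menu.any (fun kv => kv.1 == "nutrition_totals") then
      menu.filter (fun kv => kv.1 != "nutrition_totals")
    else menu
  if menu1.isEmpty then []
  else
    -- max_dishes = max(len(dishes) for dishes in menu.values()) if menu else 0
    let max_dishes : Int :=
      if menu1.isEmpty then 0
      else (PySem.List.max? (menu1.map (fun kv => (kv.2.length : Int))) id).getD 0
    (PySem.List.pyRange 0 max_dishes 1).foldl (fun days_data day =>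
      days_data ++ [menu1.foldl (fun day_dishes kv =>
        let dish_names := kv.2.map Prod.fst
        if day < (dish_names.length : Int) then
          -- dishes[dish_name]: first-match association lookup (exact for a Python dict;
          -- the guard makes the KeyError branch unreachable, so getD's default is dead)
          let dish_name := (PySem.List.pyGet? dish_names day).getD ""
          day_dishes ++ [((kv.2.find? (fun p => p.1 == dish_name)).map Prod.snd).getD 0]
        else day_dishes) []]) []

-- ===== PORT B =====
-- the inner 'for i, dish in enumerate(dishes.values()): if i == len(days): days.append([]); days[i].append(dish)'
-- loop, transcribed as structural recursion on (buckets, values): bucket i gets value i appended,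
-- a fresh bucket is created exactly when the index reaches the end of the bucket list
def mergeDay : List (List Int) → List Int → List (List Int)
  | days, [] => days
  | [], v :: vs => [v] :: mergeDay [] vs
  | d :: ds, v :: vs => (d ++ [v]) :: mergeDay ds vs

def organize_by_days_py_alt (menu : List (String × List (String × Int))) : List (List Int) :=
  let menu1 := if menu.isEmpty || menu.any (fun kv => kv.1 == "nutrition_totals") then
      menu.filter (fun kv => kv.1 != "nutrition_totals")
    else menu
  menu1.foldl (fun days kv => mergeDay days (kv.2.map Prod.snd)) []

-- ===== PRECONDITION & SPEC =====
-- Pre_ excludes association lists in which some course carries duplicate dish names: a Python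
-- dict cannot hold duplicate keys (a literal collapses them before A runs), so on such lists
-- A's first-match name lookup vs B's positional values is anybody's corner.
def Pre_organize_by_days_py (menu : List (String × List (String × Int))) : Prop :=
  ∀ kv ∈ menu, (kv.2.map Prod.fst).Nodup
instance (menu : List (String × List (String × Int))) : Decidable (Pre_organize_by_days_py menu) := by unfold Pre_organize_by_days_py; infer_instance

def pvWitness_organize_by_days_py : (List (String × List (String × Int))) :=
  [("breakfast", [("eggs", 300), ("toast", 200)]), ("lunch", [("soup", 450)])]

def Spec_organize_by_days_py (menu : List (String × List (String × Int))) (out : List (List Int)) : Prop := out = organize_by_days_py_alt menu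
instance (menu : List (String × List (String × Int))) (out : List (List Int)) : Decidable (Spec_organize_by_days_py menu out) := by unfold Spec_organize_by_days_py; infer_instance

-- ===== CLAIM (what is proved, stated in full; the proofs are below) =====
def Claim_equal_organize_by_days_py : Prop := ∀ (menu : List (String × List (String × Int))), Dom_organize_by_days_py menu → Pre_organize_by_days_py menu → Spec_organize_by_days_py menu (organize_by_days_py menu)

-- ===== LEMMAS AND PROOFS =====

def pvMaxLen (cols : List (List Int)) : Nat := (cols.map List.length).foldr max 0

-- the common canonical form: row i = the i-th dish of every course that has one
def pvG (cols : List (List Int)) : List (List Int) :=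
  (List.range (pvMaxLen cols)).map (fun i => cols.filterMap (fun c => getElem? c i))

lemma pvFoldr_max (l : List Nat) (a : Nat) : l.foldr max a = max a (l.foldr max 0) := by
  induction l with
  | nil => simp
  | cons x xs ih => simp only [List.foldr_cons, ih]; omega

lemma pvMaxLen_append_single (p : List (List Int)) (c : List Int) :
    pvMaxLen (p ++ [c]) = max (pvMaxLen p) c.length := by
  unfold pvMaxLen
  rw [List.map_append, List.foldr_append]
  simp only [List.map_cons, List.map_nil, List.foldr_cons, List.foldr_nil]
  rw [pvFoldr_max]
  omega

lemma pvLe_maxLen {c : List Int} {cols : List (List Int)} (h : c ∈ cols) :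
    c.length ≤ pvMaxLen cols := by
  induction cols with
  | nil => simp at h
  | cons d ds ih =>
    unfold pvMaxLen at *
    simp only [List.map_cons, List.foldr_cons]
    rcases List.mem_cons.mp h with rfl | h2
    · omega
    · have := ih h2; omega

lemma pvFilterMap_big {cols : List (List Int)} {i : Nat} (h : pvMaxLen cols ≤ i) :
    cols.filterMap (fun c => getElem? c i) = [] := by
  rw [List.filterMap_eq_nil_iff]
  intro c hc
  exact List.getElem?_eq_none (le_trans (pvLe_maxLen hc) h)

lemma pvG_getElem? (cols : List (List Int)) (i : Nat) :
    getElem? (pvG cols) i = if i < pvMaxLen cols then some (cols.filterMap (fun c => getElem? c i)) else none := by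
  unfold pvG
  by_cases hi : i < pvMaxLen cols
  · rw [if_pos hi]
    rw [List.getElem?_map, List.getElem?_eq_getElem (by simpa using hi)]
    simp
  · rw [if_neg hi]
    exact List.getElem?_eq_none (by simpa using Nat.le_of_not_lt hi)

lemma pvMergeDay_getElem? (days : List (List Int)) (vs : List Int) (i : Nat) :
    getElem? (mergeDay days vs) i =
      if i < max days.length vs.length then some ((getElem? days i).getD [] ++ (getElem? vs i).toList) else none := by
  induction days generalizing vs i with
  | nil =>
    induction vs generalizing i with
    | nil => simp [mergeDay]
    | cons v vs ih =>
      cases i with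
      | zero => simp [mergeDay]
      | succ i =>
        simp only [mergeDay, List.getElem?_cons_succ, ih i]
        simp only [List.length_nil, List.length_cons]
        split_ifs <;> simp_all <;> omega
  | cons d ds ihd =>
    cases vs with
    | nil =>
      show getElem? (d :: ds) i = _
      simp only [List.length_nil, Nat.max_zero]
      by_cases hi : i < (d :: ds).length
      · rw [if_pos hi, List.getElem?_eq_getElem hi]
        simp
      · rw [if_neg hi]
        exact List.getElem?_eq_none (Nat.le_of_not_lt hi)
    | cons v vs =>
      cases i with
      | zero => simp [mergeDay]
      | succ i =>
        simp only [mergeDay, List.getElem?_cons_succ, ihd vs i]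
        simp only [List.length_cons]
        split_ifs <;> simp_all <;> omega

lemma pvMergeDay_G (p : List (List Int)) (c : List Int) :
    mergeDay (pvG p) c = pvG (p ++ [c]) := by
  apply List.ext_getElem?
  intro i
  have hlen : (pvG p).length = pvMaxLen p := by simp [pvG]
  rw [pvMergeDay_getElem?, pvG_getElem?, pvG_getElem?, hlen, pvMaxLen_append_single]
  split_ifs with h h2
  · rw [List.filterMap_append]
    cases hc : getElem? c i <;> simp [List.filterMap_cons, hc]
  · rw [List.filterMap_append, pvFilterMap_big (Nat.le_of_not_lt h2)]
    cases hc : getElem? c i <;> simp [List.filterMap_cons, hc]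
  · rfl

lemma pvFoldl_mergeDay (cols p : List (List Int)) :
    cols.foldl mergeDay (pvG p) = pvG (p ++ cols) := by
  induction cols generalizing p with
  | nil => simp
  | cons c cs ih =>
    simp only [List.foldl_cons]
    rw [pvMergeDay_G, ih (p ++ [c])]
    simp

lemma pvG_nil : pvG [] = [] := by simp [pvG, pvMaxLen]

lemma pvFind_at (l : List (String × Int)) (i : Nat) (hn : (l.map Prod.fst).Nodup)
    (hi : i < l.length) : l.find? (fun p => p.1 == l[i].1) = some l[i] := by
  induction l generalizing i with
  | nil => simp at hi
  | cons a l ih =>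
    cases i with
    | zero => simp [List.find?]
    | succ i =>
      have hi2 : i < l.length := by simpa using hi
      have hmem : l[i].1 ∈ l.map Prod.fst := List.mem_map_of_mem (List.getElem_mem hi2)
      have hne : a.1 ≠ l[i].1 := by
        intro hcontra
        simp only [List.map_cons, List.nodup_cons] at hn
        exact hn.1 (hcontra ▸ hmem)
      have hbeq : (a.1 == (a :: l)[i + 1].1) = false := by simpa using hne
      simp only [List.find?, hbeq]
      simpa using ih i (List.Nodup.of_cons (by simpa using hn)) hi2

lemma pvRowA (m : List (String × List (String × Int))) (i : Nat)
    (hpre : ∀ kv ∈ m, (kv.2.map Prod.fst).Nodup) (acc : List Int) :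
    m.foldl (fun day_dishes kv =>
      let dish_names := kv.2.map Prod.fst
      if (i : Int) < (dish_names.length : Int) then
        let dish_name := (PySem.List.pyGet? dish_names (i : Int)).getD ""
        day_dishes ++ [((kv.2.find? (fun p => p.1 == dish_name)).map Prod.snd).getD 0]
      else day_dishes) acc
    = acc ++ (m.map (fun kv => kv.2.map Prod.snd)).filterMap (fun c => getElem? c i) := by
  induction m generalizing acc with
  | nil => simp
  | cons kv m ih =>
    have hpm : ∀ p ∈ m, (p.2.map Prod.fst).Nodup := fun p hp => hpre p (List.mem_cons_of_mem _ hp)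
    simp only [List.foldl_cons, List.map_cons, List.filterMap_cons]
    by_cases hi : i < kv.2.length
    · have hcond : (i : Int) < ((kv.2.map Prod.fst).length : Int) := by
        simp only [List.length_map]; exact_mod_cast hi
      rw [if_pos hcond]
      have h1 : PySem.List.pyGet? (kv.2.map Prod.fst) (i : Int) = some kv.2[i].1 := by
        rw [PySem.List.pyGet?_natCast]
        simp [hi]
      have h2 : getElem? (kv.2.map Prod.snd) i = some kv.2[i].2 := by
        simp [hi]
      rw [h1]
      simp only [Option.getD_some]
      rw [pvFind_at kv.2 i (hpre kv List.mem_cons_self) hi]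
      simp only [Option.map_some, Option.getD_some]
      rw [ih hpm (acc ++ [kv.2[i].2]), h2]
      simp
    · have hcond : ¬ ((i : Int) < ((kv.2.map Prod.fst).length : Int)) := by
        simp only [List.length_map]
        exact_mod_cast hi
      rw [if_neg hcond]
      have h2 : getElem? (kv.2.map Prod.snd) i = none := by
        simp
        omega
      rw [ih hpm acc, h2]

def pvMaxStep (acc : Option Int) (x : Int) : Option Int :=
  match acc with
  | none => some x
  | some m => if id m < id x then some x else some m

lemma pvMax?_eq (m : List (String × List (String × Int))) (h : ¬ m.isEmpty) :
    (PySem.List.max? (m.map (fun kv => (kv.2.length : Int))) id).getD 0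
      = (pvMaxLen (m.map (fun kv => kv.2.map Prod.snd)) : Int) := by
  have key : ∀ (l : List (String × List (String × Int))) (a : Nat),
      List.foldl pvMaxStep
        (some (a : Int)) (l.map (fun kv => (kv.2.length : Int)))
      = some ((max a ((l.map (fun kv => kv.2.length)).foldr max 0) : Nat) : Int) := by
    intro l
    induction l with
    | nil => intro a; simp
    | cons kv l ih =>
      intro a
      simp only [List.map_cons, List.foldl_cons, List.foldr_cons]
      have hstep : pvMaxStep (some ((a : Nat) : Int)) ((kv.2.length : Nat) : Int)
          = some ((max a kv.2.length : Nat) : Int) := by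
        simp only [pvMaxStep]
        split_ifs with hlt <;> simp only [id] at hlt <;> congr 1 <;> omega
      rw [hstep, ih (max a kv.2.length)]
      congr 1
      omega
  cases m with
  | nil => simp at h
  | cons kv m =>
    simp only [PySem.List.max?, List.map_cons, List.foldl_cons]
    rw [List.foldl_ext _ pvMaxStep _ (fun a b _ => by cases a <;> rfl)]
    rw [key m kv.2.length]
    simp only [Option.getD_some, pvMaxLen, List.map_cons, List.foldr_cons, List.map_map,
      Function.comp_def, List.length_map]

-- ===== VERDICT (by name: the statement is the Claim_ definition above) =====
theorem organize_by_days_py_spec : Claim_equal_organize_by_days_py := by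
  intro menu _hdom hpre
  unfold Spec_organize_by_days_py organize_by_days_py organize_by_days_py_alt
  set menu1 := (if menu.isEmpty || menu.any (fun kv => kv.1 == "nutrition_totals") then
      menu.filter (fun kv => kv.1 != "nutrition_totals") else menu) with hmenu1
  have hpre1 : ∀ kv ∈ menu1, (kv.2.map Prod.fst).Nodup := by
    intro kv hkv
    apply hpre
    rw [hmenu1] at hkv
    split at hkv
    · exact List.mem_of_mem_filter hkv
    · exact hkv
  have hB : menu1.foldl (fun days kv => mergeDay days (kv.2.map Prod.snd)) []
      = pvG (menu1.map (fun kv => kv.2.map Prod.snd)) := by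
    rw [← List.foldl_map]
    rw [← pvG_nil, pvFoldl_mergeDay]
    simp
  by_cases he : menu1.isEmpty
  · simp [List.isEmpty_iff.mp he]
  · simp only [he, if_false, Bool.false_eq_true]
    rw [pvMax?_eq menu1 he]
    rw [PySem.List.pyRange_zero_nat]
    rw [PySem.List.foldl_append_singleton_eq_map]
    rw [hB]
    unfold pvG
    simp only [List.nil_append, List.map_map]
    apply List.map_congr_left
    intro i _
    simpa using pvRowA menu1 i hpre1 []
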